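-- pv_equiv track=rewrite | github.com/Pengppi/algorithm-practice | leetcode/src/main/python/leetcode/editor/cn/气温变化趋势sixCE719.py | temperatureTrend
-- ===== SOURCE A (Python) =====
-- from typing import List
--
-- def temperatureTrend(temperatureA: List[int], temperatureB: List[int]) -> int:
--     n = len(temperatureA)
--     f = [0] * n
--     ans = 0
--     for i in range(1, n):
--         a = temperatureA[i] - temperatureA[i - 1]
--         b = temperatureB[i] - temperatureB[i - 1]
--         if a * b > 0 or a == 0 and b == 0:
--             f[i] = f[i - 1] + 1
--             ans = max(ans, f[i])
--     return ans
-- ===== SOURCE B (Python) =====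
-- from typing import List
--
-- def temperatureTrend(temperatureA: List[int], temperatureB: List[int]) -> int:
--     def sign(x):
--         return (x > 0) - (x < 0)
--     # table pass: does step i have the same trend in both sequences?
--     match = [sign(a2 - a1) == sign(b2 - b1)
--              for (a1, a2), (b1, b2) in zip(zip(temperatureA, temperatureA[1:]),
--                                            zip(temperatureB, temperatureB[1:]))]
--     # grouping pass: split into maximal constant runs, keep the longest True run
--     groups = []  # [key, length] pairs, like itertools.groupby
--     for m in match:
--         if groups and groups[-1][0] == m:
--             groups[-1][1] += 1
--         else:
--             groups.append([m, 1])
--     return max((length for key, length in groups if key), default=0)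
-- ===== Notes on version B (the rewrite author's own statement) =====
-- stated objective: alternative
-- what changed: Replaces A's fused DP over an index loop with a length-f table by two passes of a different shape: first a boolean table of per-step trend matches via a sign helper over zipped adjacent pairs, then an itertools.groupby-style run grouping whose longest True group is returned.
import Mathlib
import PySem

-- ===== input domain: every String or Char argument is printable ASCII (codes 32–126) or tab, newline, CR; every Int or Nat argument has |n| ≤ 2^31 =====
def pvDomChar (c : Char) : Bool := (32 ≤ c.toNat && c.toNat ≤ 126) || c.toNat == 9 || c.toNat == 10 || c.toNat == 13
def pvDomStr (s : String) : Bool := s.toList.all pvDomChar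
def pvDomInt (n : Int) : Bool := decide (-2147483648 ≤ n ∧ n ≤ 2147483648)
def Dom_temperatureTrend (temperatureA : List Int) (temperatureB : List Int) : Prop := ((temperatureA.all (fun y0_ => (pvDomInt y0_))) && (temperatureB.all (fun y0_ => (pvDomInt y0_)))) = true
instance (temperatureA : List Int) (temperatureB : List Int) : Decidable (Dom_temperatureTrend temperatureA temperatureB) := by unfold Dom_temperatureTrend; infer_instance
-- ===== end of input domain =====

-- B re-decomposes A's fused DP loop into a boolean trend-match table followed by a
-- groupby-style longest-True-run pass; same O(n) cost, objective: alternative structure.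

-- ===== PORT A =====
-- loop body of A's for-loop, as a helper (state = (f, ans), loop variable i)
def pvStepA (tA tB : List Int) (s : List Int × Int) (i : Int) : List Int × Int :=
  let a := PySem.List.pyGetD tA i 0 - PySem.List.pyGetD tA (i - 1) 0
  let b := PySem.List.pyGetD tB i 0 - PySem.List.pyGetD tB (i - 1) 0
  if a * b > 0 ∨ (a = 0 ∧ b = 0) then
    let v := PySem.List.pyGetD s.1 (i - 1) 0 + 1
    (PySem.List.pySetD s.1 i v, max s.2 v)
  else s

def temperatureTrend (temperatureA : List Int) (temperatureB : List Int) : Int :=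
  let n : Int := PySem.List.len temperatureA
  let f : List Int := List.replicate temperatureA.length 0
  ((PySem.List.pyRange 1 n 1).foldl (pvStepA temperatureA temperatureB) (f, 0)).2

-- ===== PORT B =====
-- sign(x) = (x > 0) - (x < 0)
def pvSign (x : Int) : Int := (if 0 < x then (1 : Int) else 0) - (if x < 0 then (1 : Int) else 0)

-- the boolean table: match[i] ↔ the trends of step i agree
def pvMatch (tA tB : List Int) : List Bool :=
  ((tA.zip (PySem.List.slice tA (some 1) none)).zip (tB.zip (PySem.List.slice tB (some 1) none))).map
    (fun p => pvSign (p.1.2 - p.1.1) == pvSign (p.2.2 - p.2.1))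

-- groupby-style run grouping: list of (key, run length)
def pvGroups (ms : List Bool) : List (Bool × Int) :=
  ms.foldl (fun gs m =>
    match gs.getLast? with
    | some (k, l) => if k = m then gs.dropLast ++ [(k, l + 1)] else gs ++ [(m, 1)]
    | none => [(m, 1)]) []

def temperatureTrend_alt (temperatureA : List Int) (temperatureB : List Int) : Int :=
  (((pvGroups (pvMatch temperatureA temperatureB)).filter (fun g => g.1)).foldl
    (fun acc g => max acc g.2) 0)

-- ===== PRECONDITION & SPEC =====
-- Pre_ excludes exactly the inputs where A raises IndexError: temperatureB shorter than
-- temperatureA with at least one loop step (A reads temperatureB[i] for every i < len(temperatureA)).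
def Pre_temperatureTrend (temperatureA : List Int) (temperatureB : List Int) : Prop :=
  temperatureA.length ≤ temperatureB.length ∨ temperatureA.length ≤ 1
instance (temperatureA : List Int) (temperatureB : List Int) : Decidable (Pre_temperatureTrend temperatureA temperatureB) := by unfold Pre_temperatureTrend; infer_instance

def pvWitness_temperatureTrend : List Int × List Int := ([1, 2, 3, 0], [2, 3, 1, -1])

def Spec_temperatureTrend (temperatureA : List Int) (temperatureB : List Int) (out : Int) : Prop := out = temperatureTrend_alt temperatureA temperatureB
instance (temperatureA : List Int) (temperatureB : List Int) (out : Int) : Decidable (Spec_temperatureTrend temperatureA temperatureB out) := by unfold Spec_temperatureTrend; infer_instance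

-- ===== CLAIM (what is proved, stated in full; the proofs are below) =====
def Claim_equal_temperatureTrend : Prop := ∀ (temperatureA : List Int) (temperatureB : List Int), Dom_temperatureTrend temperatureA temperatureB → Pre_temperatureTrend temperatureA temperatureB → Spec_temperatureTrend temperatureA temperatureB (temperatureTrend temperatureA temperatureB)

-- ===== LEMMAS AND PROOFS =====

-- reference single pass over the match table: (current run of Trues, best run of Trues)
def pvScan (ms : List Bool) : Int × Int :=
  ms.foldl (fun s m => ((if m then s.1 + 1 else 0), max s.2 (if m then s.1 + 1 else 0))) (0, 0)

-- the value B computes from a group list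
def pvMaxT (gs : List (Bool × Int)) : Int :=
  (gs.filter (fun g => g.1)).foldl (fun acc g => max acc g.2) 0

lemma pvScan_snoc (ms : List Bool) (m : Bool) :
    pvScan (ms ++ [m]) =
      ((if m then (pvScan ms).1 + 1 else 0),
       max (pvScan ms).2 (if m then (pvScan ms).1 + 1 else 0)) := by
  simp [pvScan, List.foldl_append]

lemma pvScan_nonneg (ms : List Bool) : 0 ≤ (pvScan ms).1 ∧ 0 ≤ (pvScan ms).2 := by
  induction ms using List.reverseRecOn with
  | nil => simp [pvScan]
  | append_singleton ms m ih =>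
      rw [pvScan_snoc]; rcases ih with ⟨h1, h2⟩
      constructor <;> dsimp only <;> split <;> omega

lemma pvSign_eq_iff (a b : Int) :
    ((pvSign a == pvSign b) = true) ↔ (a * b > 0 ∨ (a = 0 ∧ b = 0)) := by
  simp only [pvSign, beq_iff_eq, gt_iff_lt, mul_pos_iff]
  split_ifs <;> omega

lemma pvGroups_snoc (ms : List Bool) (m : Bool) :
    pvGroups (ms ++ [m]) =
      (match (pvGroups ms).getLast? with
       | some (k, l) => if k = m then (pvGroups ms).dropLast ++ [(k, l + 1)]
                        else (pvGroups ms) ++ [(m, 1)]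
       | none => [(m, 1)]) := by
  simp [pvGroups, List.foldl_append]

lemma pvMaxT_snoc (gs : List (Bool × Int)) (g : Bool × Int) :
    pvMaxT (gs ++ [g]) = if g.1 then max (pvMaxT gs) g.2 else pvMaxT gs := by
  cases hg : g.1 <;> simp [pvMaxT, List.filter_append, List.foldl_append, hg]

lemma pvMaxT_nonneg (gs : List (Bool × Int)) : 0 ≤ pvMaxT gs := by
  induction gs using List.reverseRecOn with
  | nil => simp [pvMaxT]
  | append_singleton gs g ih => rw [pvMaxT_snoc]; split <;> omega

-- loop invariant of B's grouping pass: the groups are the maximal runs of the processed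
-- prefix, the last group tracks the current run, and the filtered max equals the best run
lemma pvGroups_spec (ms : List Bool) :
    pvMaxT (pvGroups ms) = (pvScan ms).2 ∧
    (pvGroups ms = [] → ms = []) ∧
    (∀ gs k l, pvGroups ms = gs ++ [(k, l)] →
      (if k then l else 0) = (pvScan ms).1 ∧ 1 ≤ l ∧
      pvMaxT (pvGroups ms) = if k then max (pvMaxT gs) l else pvMaxT gs) := by
  induction ms using List.reverseRecOn with
  | nil =>
      refine ⟨by simp [pvGroups, pvScan, pvMaxT], fun _ => rfl, ?_⟩
      intro gs k l h
      simp [pvGroups] at h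
  | append_singleton ms m ih =>
      obtain ⟨hmax, hemp, hlast⟩ := ih
      have hs1 : (pvScan (ms ++ [m])).1 = if m then (pvScan ms).1 + 1 else 0 := by
        rw [pvScan_snoc]
      have hs2 : (pvScan (ms ++ [m])).2 = max (pvScan ms).2 (if m then (pvScan ms).1 + 1 else 0) := by
        rw [pvScan_snoc]
      cases hg : (pvGroups ms).getLast? with
      | none =>
          have hms := hemp (List.getLast?_eq_none_iff.mp hg)
          subst hms
          have hnew : pvGroups ([] ++ [m]) = [(m, 1)] := by rw [pvGroups_snoc, hg]
          rw [hnew, hs1] at *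
          rw [hs2]
          have hsc : pvScan ([] : List Bool) = (0, 0) := rfl
          refine ⟨?_, by simp, ?_⟩
          · cases m <;> simp [pvMaxT, hsc]
          · intro gs k l h
            obtain ⟨hgs, hkl⟩ := List.append_singleton_inj.mp
              (show ([] : List (Bool × Int)) ++ [(m, 1)] = gs ++ [(k, l)] by simpa using h)
            obtain ⟨hk, hl⟩ := Prod.mk.inj hkl
            subst hk; subst hl
            obtain rfl : gs = [] := hgs.symm
            cases m <;> simp [pvMaxT, hsc]
      | some g =>
          obtain ⟨k0, l0⟩ := g
          obtain ⟨dl, hdl⟩ := List.getLast?_eq_some_iff.mp hg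
          obtain ⟨hcur, hl0, hmaxdl⟩ := hlast dl k0 l0 hdl
          have hdrop : (pvGroups ms).dropLast = dl := by rw [hdl]; simp
          by_cases hkm : k0 = m
          · subst hkm
            have hnew : pvGroups (ms ++ [k0]) = dl ++ [(k0, l0 + 1)] := by
              rw [pvGroups_snoc, hg]; simp [hdrop]
            have hmaxnew : pvMaxT (pvGroups (ms ++ [k0])) =
                if k0 then max (pvMaxT dl) (l0 + 1) else pvMaxT dl := by
              rw [hnew, pvMaxT_snoc]
            refine ⟨?_, ?_, ?_⟩
            · rw [hmaxnew, hs2, ← hmax, hmaxdl]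
              have hnn := pvMaxT_nonneg dl
              cases k0 with
              | true =>
                  have hc : l0 = (pvScan ms).1 := by simpa using hcur
                  simp [← hc]
              | false =>
                  simp
                  omega
            · intro habs; rw [hnew] at habs; simp at habs
            · intro gs k l h
              rw [hnew] at h
              obtain ⟨hgs, hkl⟩ := List.append_singleton_inj.mp h
              obtain ⟨hk, hl⟩ := Prod.mk.inj hkl
              subst hk; subst hl
              obtain rfl : gs = dl := hgs.symm
              refine ⟨?_, by omega, by rw [hmaxnew]⟩
              rw [hs1]
              cases k0 <;> simp_all
          · have hnew : pvGroups (ms ++ [m]) = (dl ++ [(k0, l0)]) ++ [(m, 1)] := by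
              rw [pvGroups_snoc, hg, ← hdl]
              simp [hkm]
            have hmaxnew : pvMaxT (pvGroups (ms ++ [m])) =
                if m then max (pvMaxT (dl ++ [(k0, l0)])) 1 else pvMaxT (dl ++ [(k0, l0)]) := by
              rw [hnew, pvMaxT_snoc]
            have hback : pvMaxT (dl ++ [(k0, l0)]) = (pvScan ms).2 := by rw [← hdl, hmax]
            have hnn := pvMaxT_nonneg (dl ++ [(k0, l0)])
            refine ⟨?_, ?_, ?_⟩
            · rw [hmaxnew, hs2, hback]
              cases m with
              | true =>
                  have hk0 : k0 = false := by cases k0 <;> simp_all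
                  have : (pvScan ms).1 = 0 := by rw [← hcur, hk0]; simp
                  rw [this]; simp
              | false => simp; omega
            · intro habs; rw [hnew] at habs; simp at habs
            · intro gs k l h
              rw [hnew] at h
              obtain ⟨hgs, hkl⟩ := List.append_singleton_inj.mp h
              obtain ⟨hk, hl⟩ := Prod.mk.inj hkl
              subst hk; subst hl
              obtain rfl : gs = dl ++ [(k0, l0)] := hgs.symm
              refine ⟨?_, by omega, by rw [hmaxnew]⟩
              rw [hs1]
              cases m with
              | true =>
                  have hk0 : k0 = false := by cases k0 <;> simp_all
                  have : (pvScan ms).1 = 0 := by rw [← hcur, hk0]; simp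
                  rw [this]; simp
              | false => simp

lemma length_pvMatch (tA tB : List Int) :
    (pvMatch tA tB).length = min (tA.length - 1) (tB.length - 1) := by
  simp [pvMatch, PySem.List.slice_from_one]

-- pvMatch's k-th entry, phrased with pyGetD at the loop's indices (no embedded proofs)
lemma getElem?_pvMatch (tA tB : List Int) (k : Nat) (hk : k < (pvMatch tA tB).length) :
    (pvMatch tA tB)[k]? = some
      (pvSign (PySem.List.pyGetD tA (1 + (k : Int)) 0 - PySem.List.pyGetD tA (1 + (k : Int) - 1) 0) ==
       pvSign (PySem.List.pyGetD tB (1 + (k : Int)) 0 - PySem.List.pyGetD tB (1 + (k : Int) - 1) 0)) := by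
  have hl := length_pvMatch tA tB
  have h1 : k + 1 < tA.length := by omega
  have h2 : k + 1 < tB.length := by omega
  have e1 : (1 + (k : Int)) = ((k + 1 : Nat) : Int) := by omega
  have e2 : (1 + (k : Int) - 1) = ((k : Nat) : Int) := by omega
  rw [e2, e1]
  simp only [PySem.List.pyGetD_natCast]
  rw [List.getElem?_eq_getElem hk]
  simp [pvMatch, PySem.List.slice_from_one, List.getElem_zip, List.getElem_tail,
    List.getElem?_eq_getElem h1, List.getElem?_eq_getElem h2,
    List.getElem?_eq_getElem (by omega : k < tA.length),
    List.getElem?_eq_getElem (by omega : k < tB.length)]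

-- loop invariant of A's DP loop: after the steps i = 1..k, ans is the best run of the
-- first k table entries, f has its original length, f[k] is the current run and every
-- not-yet-written cell is still 0
lemma A_loop (tA tB : List Int) (k : Nat) (hk : k ≤ (pvMatch tA tB).length) :
    (((PySem.List.pyRange 1 (1 + (k : Int)) 1).foldl (pvStepA tA tB)
        (List.replicate tA.length 0, 0)).2 = (pvScan ((pvMatch tA tB).take k)).2) ∧
    (((PySem.List.pyRange 1 (1 + (k : Int)) 1).foldl (pvStepA tA tB)
        (List.replicate tA.length 0, 0)).1.length = tA.length) ∧
    (∀ j : Nat, k ≤ j →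
      PySem.List.pyGetD (((PySem.List.pyRange 1 (1 + (k : Int)) 1).foldl (pvStepA tA tB)
        (List.replicate tA.length 0, 0)).1) (j : Int) 0 =
        if j = k then (pvScan ((pvMatch tA tB).take k)).1 else 0) := by
  induction k with
  | zero =>
      have hr : PySem.List.pyRange 1 (1 + (0:Nat) : Int) 1 = [] := by
        norm_num [PySem.List.pyRange_one]
      rw [hr]
      refine ⟨by simp [pvScan], by simp, ?_⟩
      intro j _
      simp [pvScan, PySem.List.pyGetD_natCast, List.getD]
  | succ k ih =>
      have hk' : k ≤ (pvMatch tA tB).length := by omega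
      obtain ⟨ih2, ihlen, ihget⟩ := ih hk'
      have hl := length_pvMatch tA tB
      have hr : PySem.List.pyRange 1 (1 + ((k+1:Nat) : Int)) 1 =
          PySem.List.pyRange 1 (1 + (k : Int)) 1 ++ [1 + (k : Int)] := by
        have e : (1 + ((k+1:Nat) : Int)) = (1 + (k:Int)) + 1 := by omega
        rw [e, PySem.List.pyRange_one_succ_right (by omega)]
      rw [hr, List.foldl_append, List.foldl_cons, List.foldl_nil]
      set st := (PySem.List.pyRange 1 (1 + (k : Int)) 1).foldl (pvStepA tA tB)
        (List.replicate tA.length 0, 0) with hst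
      obtain ⟨m, hm⟩ : ∃ m, (pvMatch tA tB)[k]? = some m :=
        ⟨_, List.getElem?_eq_getElem (by omega)⟩
      have hmval := (getElem?_pvMatch tA tB k (by omega)).symm.trans hm
      have hrel : (m = true) ↔
          ((PySem.List.pyGetD tA (1 + (k:Int)) 0 - PySem.List.pyGetD tA (1 + (k:Int) - 1) 0) *
             (PySem.List.pyGetD tB (1 + (k:Int)) 0 - PySem.List.pyGetD tB (1 + (k:Int) - 1) 0) > 0 ∨
           (PySem.List.pyGetD tA (1 + (k:Int)) 0 - PySem.List.pyGetD tA (1 + (k:Int) - 1) 0 = 0 ∧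
            PySem.List.pyGetD tB (1 + (k:Int)) 0 - PySem.List.pyGetD tB (1 + (k:Int) - 1) 0 = 0)) := by
        rw [show m = (pvSign (PySem.List.pyGetD tA (1 + (k : Int)) 0 - PySem.List.pyGetD tA (1 + (k : Int) - 1) 0) ==
            pvSign (PySem.List.pyGetD tB (1 + (k : Int)) 0 - PySem.List.pyGetD tB (1 + (k : Int) - 1) 0))
          from Option.some.inj hmval.symm]
        exact pvSign_eq_iff _ _
      have htake : (pvMatch tA tB).take (k+1) = (pvMatch tA tB).take k ++ [m] := by
        rw [List.take_add_one, hm]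
        simp
      have hgetk : PySem.List.pyGetD st.1 (1 + (k:Int) - 1) 0 = (pvScan ((pvMatch tA tB).take k)).1 := by
        rw [show (1 + (k:Int) - 1) = ((k : Nat) : Int) by omega]
        simpa using ihget k le_rfl
      rw [htake, pvScan_snoc]
      cases m with
      | true =>
          have hcondT := hrel.mp rfl
          simp only [pvStepA]
          rw [if_pos hcondT, hgetk]
          refine ⟨by rw [ih2]; simp, ?_, ?_⟩
          · dsimp only
            simp [PySem.List.length_pySetD, ihlen]
          · intro j hj
            dsimp only
            rw [show (1 + (k:Int)) = ((k+1 : Nat) : Int) by omega]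
            rw [PySem.List.pyGetD_pySetD_natCast st.1 (k+1) j _ _ (by rw [ihlen]; omega)]
            by_cases hjk : j = k + 1
            · subst hjk
              simp
            · rw [if_neg hjk, ihget j (by omega)]
              have : j ≠ k := by omega
              simp [hjk, this]
      | false =>
          have hcondF : ¬ _ := fun h => by simpa using hrel.mpr h
          simp only [pvStepA]
          rw [if_neg hcondF]
          have hnn := pvScan_nonneg ((pvMatch tA tB).take k)
          refine ⟨by rw [ih2]; simp only [Bool.false_eq_true, if_false]; exact (max_eq_left hnn.2).symm, ihlen, ?_⟩
          intro j hj
          rw [ihget j (by omega)]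
          have hne : j ≠ k := by omega
          simp [hne]

lemma alt_eq (tA tB : List Int) :
    temperatureTrend_alt tA tB = (pvScan (pvMatch tA tB)).2 := by
  have h := (pvGroups_spec (pvMatch tA tB)).1
  simpa [temperatureTrend_alt, pvMaxT] using h

lemma a_eq (tA tB : List Int) (hpre : Pre_temperatureTrend tA tB) :
    temperatureTrend tA tB = (pvScan (pvMatch tA tB)).2 := by
  have hlen := length_pvMatch tA tB
  unfold temperatureTrend
  simp only [PySem.List.len_eq]
  rcases Nat.eq_zero_or_pos tA.length with h0 | hpos
  · have hmnil : pvMatch tA tB = [] := List.eq_nil_of_length_eq_zero (by omega)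
    rw [h0]
    simp [pvScan, hmnil]
  · have hms : (pvMatch tA tB).length = tA.length - 1 := by
      unfold Pre_temperatureTrend at hpre; omega
    have hn : ((tA.length : Int)) = 1 + (((pvMatch tA tB).length : Nat) : Int) := by omega
    rw [hn]
    have h := (A_loop tA tB (pvMatch tA tB).length le_rfl).1
    rw [List.take_length] at h
    exact h

-- ===== VERDICT (by name: the statement is the Claim_ definition above) =====
theorem temperatureTrend_spec : Claim_equal_temperatureTrend := by
  intro tA tB _ hpre
  unfold Spec_temperatureTrend
  rw [a_eq tA tB hpre, alt_eq]
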